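-- pv_equiv track=rewrite | github.com/tmk-07/os-calculator | churrooscalc.py | has_restricted_parentheses
-- ===== SOURCE A (Python) =====
-- def has_restricted_parentheses(expr, restriction_ops):
--     """More efficient parentheses checker"""
--     paren_stack = []
--     for i, char in enumerate(expr):
--         if char == '(':
--             paren_stack.append(i)
--         elif char == ')':
--             if paren_stack:
--                 start = paren_stack.pop()
--                 if any(op in expr[start+1:i] for op in restriction_ops):
--                     return True
--     return False
-- ===== SOURCE B (Python) =====
-- def _first_ge(js, x):
--     """index of the first element >= x in the ascending list js (= len(js) if none)"""
--     lo, hi = 0, len(js)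
--     while lo < hi:
--         mid = (lo + hi) // 2
--         if js[mid] < x:
--             lo = mid + 1
--         else:
--             hi = mid
--     return lo
--
-- def has_restricted_parentheses(expr, restriction_ops):
--     """Collect all matched pairs in one stack pass (done if there are none); then,
--     per op, compute its occurrence positions once and binary-search each pair's
--     range (no substring search per closing parenthesis)."""
--     pairs = []
--     stack = []
--     for i, ch in enumerate(expr):
--         if ch == '(':
--             stack.append(i)
--         elif ch == ')':
--             if stack:
--                 pairs.append((stack.pop(), i))
--     if not pairs:
--         return False
--     n = len(expr)
--     for op in restriction_ops:
--         L = len(op)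
--         js = [j for j in range(n - L + 1) if expr[j:j+L] == op]
--         for (s, e) in pairs:
--             k = _first_ge(js, s + 1)
--             if k < len(js) and js[k] + L <= e:
--                 return True
--     return False
-- ===== Notes on version B (the rewrite author's own statement) =====
-- stated objective: alternative
-- what changed: B collects all matched parenthesis pairs in one stack pass (returning False early when there are none), precomputes each operator's occurrence positions once, and decides each pair by binary-searching that sorted index, instead of A's substring search over a fresh slice at every closing parenthesis.
import Mathlib
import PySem

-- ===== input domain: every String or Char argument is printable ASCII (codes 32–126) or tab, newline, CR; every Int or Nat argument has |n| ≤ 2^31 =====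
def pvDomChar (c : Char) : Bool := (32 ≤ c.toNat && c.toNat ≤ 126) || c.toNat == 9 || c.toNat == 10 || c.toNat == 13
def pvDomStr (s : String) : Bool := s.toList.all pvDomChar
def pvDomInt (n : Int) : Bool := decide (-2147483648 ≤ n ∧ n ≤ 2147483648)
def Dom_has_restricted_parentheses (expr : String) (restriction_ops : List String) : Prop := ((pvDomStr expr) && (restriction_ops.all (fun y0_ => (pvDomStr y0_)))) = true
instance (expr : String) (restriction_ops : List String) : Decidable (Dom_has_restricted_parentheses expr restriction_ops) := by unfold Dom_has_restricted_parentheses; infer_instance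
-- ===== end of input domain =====

-- B is an alternative algorithm: one stack pass collects all matched pairs (done if none),
-- then one occurrence index per op is binary-searched per pair; A searches a substring in a
-- fresh slice at every ')'. Same proved value on every Dom input.

-- ===== PORT A =====
-- the enumerate loop of A with early return; `op in expr[start+1:i]` is PySem.Chars.isIn on the PySem slice
def pvGoA (chars : List Char) (ops : List String) : List Char → Nat → List Nat → Bool
  | [], _, _ => false
  | c :: rest, i, stack =>
    if c = '(' then pvGoA chars ops rest (i+1) (i :: stack)
    else if c = ')' then
      match stack with
      | [] => pvGoA chars ops rest (i+1) []
      | s :: st =>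
        if ops.any (fun op => PySem.Chars.isIn op.toList
            (PySem.List.slice chars (some ((s+1 : Nat) : Int)) (some ((i : Nat) : Int)))) then true
        else pvGoA chars ops rest (i+1) st
    else pvGoA chars ops rest (i+1) stack

def has_restricted_parentheses (expr : String) (restriction_ops : List String) : Bool :=
  pvGoA expr.toList restriction_ops expr.toList 0 []

-- ===== PORT B =====
-- occurrence positions of op in chars: [j for j in range(n - L + 1) if expr[j:j+L] == op];
-- Nat range is exact here: when L > n Python's range is empty while Lean's contains only j = 0,
-- which the filter rejects (a list shorter than op never equals op), so the resulting lists are equal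
def pvOcc (chars : List Char) (op : List Char) : List Nat :=
  (List.range (chars.length - op.length + 1)).filter
    (fun j => PySem.List.slice chars (some ((j : Nat) : Int)) (some (((j : Nat) : Int) + ((op.length : Nat) : Int))) == op)

-- _first_ge's while loop; js[mid] is ported with getD, exact since mid < hi <= len(js) at every call
def pvBS (js : List Nat) (x : Nat) (lo hi : Nat) : Nat :=
  if _h : lo < hi then
    if js.getD ((lo + hi) / 2) 0 < x then pvBS js x ((lo + hi) / 2 + 1) hi
    else pvBS js x lo ((lo + hi) / 2)
  else lo
termination_by hi - lo
decreasing_by all_goals omega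

-- the pair-collecting stack pass of B (pairs appended in the order their ')' is met)
def pvPairs : List Char → Nat → List Nat → List (Nat × Nat)
  | [], _, _ => []
  | c :: rest, i, stack =>
    if c = '(' then pvPairs rest (i+1) (i :: stack)
    else if c = ')' then
      match stack with
      | [] => pvPairs rest (i+1) []
      | s :: st => (s, i) :: pvPairs rest (i+1) st
    else pvPairs rest (i+1) stack

-- B's early `if not pairs: return False`, then its per-op loop with early `return True` (= nested any)
def has_restricted_parentheses_alt (expr : String) (restriction_ops : List String) : Bool :=
  let chars := expr.toList
  let pairs := pvPairs chars 0 []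
  if pairs.isEmpty then false
  else restriction_ops.any (fun op =>
    let js := pvOcc chars op.toList
    pairs.any (fun p =>
      let k := pvBS js (p.1 + 1) 0 js.length
      decide (k < js.length) && decide (js.getD k 0 + op.toList.length ≤ p.2)))

-- ===== PRECONDITION & SPEC =====
def Spec_has_restricted_parentheses (expr : String) (restriction_ops : List String) (out : Bool) : Prop := out = has_restricted_parentheses_alt expr restriction_ops
instance (expr : String) (restriction_ops : List String) (out : Bool) : Decidable (Spec_has_restricted_parentheses expr restriction_ops out) := by unfold Spec_has_restricted_parentheses; infer_instance

-- ===== CLAIM (what is proved, stated in full; the proofs are below) =====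
def Claim_equal_has_restricted_parentheses : Prop := ∀ (expr : String) (restriction_ops : List String), Dom_has_restricted_parentheses expr restriction_ops → Spec_has_restricted_parentheses expr restriction_ops (has_restricted_parentheses expr restriction_ops)

-- ===== LEMMAS AND PROOFS =====

-- A's early-return scan equals "some collected pair passes A's slice test"
theorem pvGoA_eq_any (chars : List Char) (ops : List String) :
    ∀ (rest : List Char) (i : Nat) (stack : List Nat),
      pvGoA chars ops rest i stack =
        (pvPairs rest i stack).any (fun p => ops.any (fun op => PySem.Chars.isIn op.toList
          (PySem.List.slice chars (some ((p.1 + 1 : Nat) : Int)) (some ((p.2 : Nat) : Int)))))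
  | [], _, _ => by simp [pvGoA, pvPairs]
  | c :: rest, i, stack => by
    by_cases h1 : c = '('
    · simp only [pvGoA, pvPairs, if_pos h1]
      exact pvGoA_eq_any chars ops rest (i+1) (i :: stack)
    · by_cases h2 : c = ')'
      · cases stack with
        | nil =>
          simp only [pvGoA, pvPairs, if_neg h1, if_pos h2]
          exact pvGoA_eq_any chars ops rest (i+1) []
        | cons s st =>
          simp only [pvGoA, pvPairs, if_neg h1, if_pos h2]
          rw [pvGoA_eq_any chars ops rest (i+1) st]
          cases hB : (ops.any fun op => PySem.Chars.isIn op.toList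
              (PySem.List.slice chars (some ((s+1 : Nat) : Int)) (some ((i : Nat) : Int)))) with
          | false => simp only [Nat.cast_add, Nat.cast_one] at hB; simp [hB]
          | true => simp only [Nat.cast_add, Nat.cast_one] at hB; simp [hB]
      · simp only [pvGoA, pvPairs, if_neg h1, if_neg h2]
        exact pvGoA_eq_any chars ops rest (i+1) stack

-- every pair produced by pvPairs satisfies s < e and e < i + rest.length
theorem pvPairs_bounds :
    ∀ (rest : List Char) (i : Nat) (stack : List Nat),
      (∀ s ∈ stack, s < i) →
      ∀ p ∈ pvPairs rest i stack, p.1 < p.2 ∧ p.2 < i + rest.length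
  | [], _, _, _ => by simp [pvPairs]
  | c :: rest, i, stack, hstack => by
    intro p hp
    by_cases h1 : c = '('
    · simp only [pvPairs, if_pos h1] at hp
      have := pvPairs_bounds rest (i+1) (i :: stack)
        (by intro x hx
            rw [List.mem_cons] at hx
            rcases hx with rfl | hx
            · omega
            · exact Nat.lt_succ_of_lt (hstack _ hx)) p hp
      simp only [List.length_cons]; omega
    · by_cases h2 : c = ')'
      · cases stack with
        | nil =>
          simp only [pvPairs, if_neg h1, if_pos h2] at hp
          have := pvPairs_bounds rest (i+1) [] (by simp) p hp
          simp only [List.length_cons]; omega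
        | cons s st =>
          simp only [pvPairs, if_neg h1, if_pos h2, List.mem_cons] at hp
          rcases hp with rfl | hp
          · have := hstack s (by simp)
            simp only [List.length_cons]; omega
          · have := pvPairs_bounds rest (i+1) st
              (by intro x hx; exact Nat.lt_succ_of_lt (hstack _ (List.mem_cons_of_mem _ hx))) p hp
            simp only [List.length_cons]; omega
      · simp only [pvPairs, if_neg h1, if_neg h2] at hp
        have := pvPairs_bounds rest (i+1) stack
          (by intro x hx; exact Nat.lt_succ_of_lt (hstack _ hx)) p hp
        simp only [List.length_cons]; omega

-- membership in B's occurrence index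
theorem mem_pvOcc (chars op : List Char) (j : Nat) :
    j ∈ pvOcc chars op ↔ j < chars.length - op.length + 1 ∧ op <+: chars.drop j := by
  unfold pvOcc
  rw [List.mem_filter, List.mem_range,
    PySem.List.slice_natCast_add chars j op.length, beq_iff_eq]
  constructor
  · rintro ⟨h1, h2⟩
    exact ⟨h1, h2 ▸ List.take_prefix _ _⟩
  · rintro ⟨h1, h2⟩
    exact ⟨h1, (List.prefix_iff_eq_take.mp h2).symm⟩

-- A's slice test, as existence of an indexed occurrence enclosed by the pair
theorem isIn_slice_iff (chars op : List Char) (s e : Nat)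
    (hse : s < e) (hen : e ≤ chars.length) :
    PySem.Chars.isIn op (PySem.List.slice chars (some ((s + 1 : Nat) : Int)) (some ((e : Nat) : Int))) = true
      ↔ ∃ j ∈ pvOcc chars op, s + 1 ≤ j ∧ j + op.length ≤ e := by
  have hslice : PySem.List.slice chars (some ((s + 1 : Nat) : Int)) (some ((e : Nat) : Int))
      = (chars.drop (s+1)).take (e - (s+1)) := by
    rw [PySem.List.slice_toNat chars (by positivity) (by positivity)]
    simp
  rw [hslice]
  constructor
  · intro h
    rw [← PySem.Chars.exists_prefix_drop_iff_isIn] at h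
    obtain ⟨j', hj'⟩ := h
    rw [List.drop_take] at hj'
    rcases (List.prefix_take_iff).mp hj' with ⟨hpre, hlen⟩
    rw [List.drop_drop] at hpre
    rcases Nat.eq_zero_or_pos op.length with hL | hL
    · -- op = []: pick j = s+1
      have hop : op = [] := List.eq_nil_of_length_eq_zero hL
      refine ⟨s+1, ?_, ?_⟩
      · rw [mem_pvOcc]; exact ⟨by omega, by simp [hop]⟩
      · simp [hop]; omega
    · have hlen2 : op.length ≤ (chars.drop (s + 1 + j')).length := hpre.length_le
      rw [List.length_drop] at hlen2
      refine ⟨s + 1 + j', ?_, ?_⟩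
      · rw [mem_pvOcc]; exact ⟨by omega, hpre⟩
      · omega
  · intro h
    obtain ⟨j, hjmem, hj⟩ := h
    rw [mem_pvOcc] at hjmem
    rw [← PySem.Chars.exists_prefix_drop_iff_isIn]
    refine ⟨j - (s+1), ?_⟩
    rw [List.drop_take, List.prefix_take_iff, List.drop_drop]
    have hjq : s + 1 + (j - (s+1)) = j := by omega
    rw [hjq]
    exact ⟨hjmem.2, by omega⟩

-- B's occurrence index is strictly increasing
theorem pvOcc_sorted (chars op : List Char) : (pvOcc chars op).Pairwise (· < ·) :=
  List.Pairwise.filter _ (List.pairwise_lt_range)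

-- on a strictly increasing list, getD is monotone below the length
theorem getD_mono (js : List Nat) (hs : js.Pairwise (· < ·)) {k m : Nat}
    (hkm : k ≤ m) (hm : m < js.length) : js.getD k 0 ≤ js.getD m 0 := by
  rcases Nat.eq_or_lt_of_le hkm with rfl | h
  · exact le_refl _
  · rw [List.getD_eq_getElem _ _ (by omega), List.getD_eq_getElem _ _ hm]
    exact le_of_lt ((List.pairwise_iff_getElem.mp hs) k m (by omega) hm h)

-- the binary search returns the first index whose element is ≥ x
theorem pvBS_spec (js : List Nat) (x : Nat) (lo hi : Nat)
    (hs : js.Pairwise (· < ·)) (hlohi : lo ≤ hi) (hhi : hi ≤ js.length)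
    (hpre : ∀ k, k < lo → js.getD k 0 < x)
    (hpost : ∀ k, hi ≤ k → k < js.length → x ≤ js.getD k 0) :
    pvBS js x lo hi ≤ js.length ∧
      (∀ k, k < pvBS js x lo hi → js.getD k 0 < x) ∧
      (∀ k, pvBS js x lo hi ≤ k → k < js.length → x ≤ js.getD k 0) := by
  unfold pvBS
  split
  · rename_i h
    split
    · rename_i hmid
      exact pvBS_spec js x ((lo + hi) / 2 + 1) hi hs (by omega) hhi
        (fun k hk => lt_of_le_of_lt (getD_mono js hs (by omega) (by omega)) hmid)
        hpost
    · rename_i hmid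
      exact pvBS_spec js x lo ((lo + hi) / 2) hs (by omega) (by omega) hpre
        (fun k hk hk2 => le_trans (le_of_not_gt hmid) (getD_mono js hs (by omega) hk2))
  · rename_i h
    exact ⟨by omega, fun k hk => hpre k hk, fun k hk hk2 => hpost k (by omega) hk2⟩
termination_by hi - lo
decreasing_by all_goals omega

-- existence of an enclosed occurrence equals B's binary-search test
theorem exists_iff_bs (js : List Nat) (hs : js.Pairwise (· < ·)) (x L e : Nat) :
    (∃ j ∈ js, x ≤ j ∧ j + L ≤ e) ↔
      (pvBS js x 0 js.length < js.length ∧ js.getD (pvBS js x 0 js.length) 0 + L ≤ e) := by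
  obtain ⟨hr1, hr2, hr3⟩ := pvBS_spec js x 0 js.length hs (by omega) (le_refl _)
    (by omega) (by omega)
  set r := pvBS js x 0 js.length with hrdef
  constructor
  · rintro ⟨j, hj, hxj, hje⟩
    obtain ⟨k, hk, rfl⟩ := List.mem_iff_getElem.mp hj
    have hkr : r ≤ k := by
      by_contra hc
      have := hr2 k (by omega)
      rw [List.getD_eq_getElem _ _ hk] at this
      omega
    have hrlen : r < js.length := by omega
    have hmono := getD_mono js hs hkr hk
    rw [List.getD_eq_getElem _ _ hk] at hmono
    exact ⟨hrlen, by omega⟩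
  · rintro ⟨hrlen, hle⟩
    refine ⟨js.getD r 0, ?_, hr3 r (le_refl _) hrlen, hle⟩
    rw [List.getD_eq_getElem _ _ hrlen]
    exact List.getElem_mem _

-- A's slice test on a pair (s,e) with s < e ≤ n equals B's binary-search test
theorem slice_test_eq (chars op : List Char) (s e : Nat)
    (hse : s < e) (hen : e ≤ chars.length) :
    PySem.Chars.isIn op (PySem.List.slice chars (some ((s + 1 : Nat) : Int)) (some ((e : Nat) : Int)))
      = (decide (pvBS (pvOcc chars op) (s + 1) 0 (pvOcc chars op).length < (pvOcc chars op).length) &&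
         decide ((pvOcc chars op).getD (pvBS (pvOcc chars op) (s + 1) 0 (pvOcc chars op).length) 0 + op.length ≤ e)) := by
  rw [Bool.eq_iff_iff]
  simp only [Bool.and_eq_true, decide_eq_true_eq]
  rw [isIn_slice_iff chars op s e hse hen]
  exact exists_iff_bs (pvOcc chars op) (pvOcc_sorted chars op) (s+1) op.length e

-- pointwise agreement turned into equality of the two `any`s
theorem any_congr_mem {α : Type} (l : List α) (f g : α → Bool)
    (h : ∀ x ∈ l, f x = g x) : l.any f = l.any g := by
  induction l with
  | nil => rfl
  | cons x t ih =>
    simp only [List.any_cons, h x (by simp)]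
    rw [ih (fun y hy => h y (List.mem_cons_of_mem _ hy))]

-- the two nestings of `any` agree (A tests ops per pair, B tests pairs per op)
theorem any_swap {α β : Type} (l : List α) (m : List β) (f : α → β → Bool) :
    l.any (fun x => m.any (fun y => f x y)) = m.any (fun y => l.any (fun x => f x y)) := by
  rw [Bool.eq_iff_iff]
  simp only [List.any_eq_true]
  exact ⟨fun ⟨x, hx, y, hy, h⟩ => ⟨y, hy, x, hx, h⟩, fun ⟨y, hy, x, hx, h⟩ => ⟨x, hx, y, hy, h⟩⟩

-- ===== VERDICT (by name: the statement is the Claim_ definition above) =====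
theorem has_restricted_parentheses_spec : Claim_equal_has_restricted_parentheses := by
  intro expr ops _
  unfold Spec_has_restricted_parentheses has_restricted_parentheses
  simp only [has_restricted_parentheses_alt]
  rw [pvGoA_eq_any]
  have hstep : (pvPairs expr.toList 0 []).any
      (fun p => ops.any fun op => PySem.Chars.isIn op.toList
        (PySem.List.slice expr.toList (some ((p.1 + 1 : Nat) : Int)) (some ((p.2 : Nat) : Int))))
    = (pvPairs expr.toList 0 []).any (fun p => ops.any fun op =>
        decide (pvBS (pvOcc expr.toList op.toList) (p.1 + 1) 0 (pvOcc expr.toList op.toList).length < (pvOcc expr.toList op.toList).length) &&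
        decide ((pvOcc expr.toList op.toList).getD (pvBS (pvOcc expr.toList op.toList) (p.1 + 1) 0 (pvOcc expr.toList op.toList).length) 0 + op.toList.length ≤ p.2)) := by
    apply any_congr_mem
    intro p hp
    have hb := pvPairs_bounds expr.toList 0 [] (by simp) p hp
    apply any_congr_mem
    intro op _
    have h2 : p.2 ≤ expr.toList.length := by have := hb.2; omega
    exact slice_test_eq expr.toList op.toList p.1 p.2 hb.1 h2
  rw [hstep, any_swap]
  cases hP : pvPairs expr.toList 0 [] with
  | nil => simp
  | cons a t => simp
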